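-- pv_equiv track=rewrite | github.com/MitraLab-Organization/bap-ontology-editor | scripts/ai_process_request.py | find_ambiguous_names
-- ===== SOURCE A (Python) =====
-- def find_ambiguous_names(structures: list[str]) -> dict[str, list[str]]:
--     """Find structure names that could be ambiguous (e.g., 'Skin' appears multiple times)."""
--     name_counts = {}
--
--     for s in structures:
--         # Extract just the name (before the ID)
--         if ' (' in s:
--             name = s.split(' (')[0].lower()
--         else:
--             name = s.lower()
--
--         if name not in name_counts:
--             name_counts[name] = []
--         name_counts[name].append(s)
--
--     # Return only names with multiple entries
--     return {k: v for k, v in name_counts.items() if len(v) > 1}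
-- ===== SOURCE B (Python) =====
-- def find_ambiguous_names(structures: list[str]) -> dict[str, list[str]]:
--     """Find structure names that could be ambiguous (e.g., 'Skin' appears multiple times)."""
--     def key(s):
--         return s.split(' (')[0].lower() if ' (' in s else s.lower()
--
--     # Stable sort of the indexed entries by normalized name: equal names become
--     # consecutive runs, with the original relative order preserved inside a run.
--     order = sorted(enumerate(structures), key=lambda p: key(p[1]))
--
--     # Cut the sorted list into maximal runs of equal normalized name.
--     runs = []
--     for p in order:
--         if runs and key(runs[-1][-1][1]) == key(p[1]):
--             runs[-1].append(p)
--         else: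
--             runs.append([p])
--
--     # Keep the ambiguous runs, restore first-occurrence order via the run's first index.
--     runs = [r for r in runs if len(r) > 1]
--     runs.sort(key=lambda r: r[0][0])
--     return {key(r[0][1]): [s for _, s in r] for r in runs}
-- ===== Notes on version B (the rewrite author's own statement) =====
-- stated objective: alternative
-- what changed: B never maintains a dict of per-name accumulator lists: it stable-sorts the indexed entries by normalized name, cuts the sorted list into consecutive equal-name runs, keeps the runs longer than one, and reorders them by their first original index to restore A's first-occurrence key order.
import Mathlib
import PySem

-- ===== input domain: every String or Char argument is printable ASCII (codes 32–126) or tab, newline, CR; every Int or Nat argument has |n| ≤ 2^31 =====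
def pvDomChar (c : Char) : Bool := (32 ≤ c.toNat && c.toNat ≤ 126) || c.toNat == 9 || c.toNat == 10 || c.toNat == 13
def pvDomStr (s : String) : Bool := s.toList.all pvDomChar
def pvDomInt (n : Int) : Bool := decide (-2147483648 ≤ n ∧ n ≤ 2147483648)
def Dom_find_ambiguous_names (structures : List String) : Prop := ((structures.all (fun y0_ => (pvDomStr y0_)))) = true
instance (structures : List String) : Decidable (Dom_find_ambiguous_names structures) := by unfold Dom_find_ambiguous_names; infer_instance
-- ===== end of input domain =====

-- B replaces A's incremental dict-of-lists grouping with a stable sort by normalized name,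
-- a cut into consecutive equal-name runs, and a reorder of the ambiguous runs by first index
-- (objective: alternative algorithm; same output, including key order).

-- ===== PORT A =====
-- shared key normalisation: both Pythons compute  s.split(' (')[0].lower() if ' (' in s else s.lower()
-- split? is some (sep ≠ ""), and a Python split is never empty, so getD []/headD "" are exact
def pvKey (s : String) : String :=
  if PySem.Str.isIn " (" s
  then PySem.Str.lower (((PySem.Str.split? s " (").getD []).headD "")
  else PySem.Str.lower s

def find_ambiguous_names (structures : List String) : List (String × List String) :=
  let name_counts : PySem.Dict String (List String) :=
    structures.foldl (fun d s =>
      (if d.contains (pvKey s) then d else d.insert (pvKey s) []).modify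
        (pvKey s) [] (fun v => v ++ [s])) PySem.Dict.empty
  (name_counts.items.foldl
      (fun r kv => if kv.2.length > 1 then r.insert kv.1 kv.2 else r)
      (PySem.Dict.empty : PySem.Dict String (List String))).items

-- ===== PORT B =====
-- 'runs[-1][-1]' / 'r[0]' are read with getLast?/headD; the defaults are never used (the runs
-- the loop builds are nonempty), matching Python where those indexings cannot raise.
-- the loop body of B's run-cutting pass: extend the last run on an equal name, else open a new run
def pvStep (runs : List (List (Int × String))) (p : Int × String) : List (List (Int × String)) :=
  match runs.getLast? with
  | some r => if pvKey ((r.getLastD ((0:Int), "")).2) == pvKey p.2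
              then runs.dropLast ++ [r ++ [p]]
              else runs ++ [[p]]
  | none => runs ++ [[p]]

def find_ambiguous_names_alt (structures : List String) : List (String × List String) :=
  let order := PySem.List.sorted (PySem.List.enumerate structures 0) (fun p => pvKey p.2) false
  let runs : List (List (Int × String)) := order.foldl pvStep []
  let runs2 := runs.filter (fun r => r.length > 1)
  let runs3 := PySem.List.sorted runs2 (fun r => (r.headD ((0:Int), "")).1) false
  (runs3.foldl (fun (d : PySem.Dict String (List String)) r =>
      d.insert (pvKey ((r.headD ((0:Int), "")).2)) (r.map (fun p => p.2)))
    PySem.Dict.empty).items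

-- ===== PRECONDITION & SPEC =====
-- A is total: no Pre_ needed.
def Spec_find_ambiguous_names (structures : List String) (out : List (String × List String)) : Prop := out = find_ambiguous_names_alt structures
instance (structures : List String) (out : List (String × List String)) : Decidable (Spec_find_ambiguous_names structures out) := by unfold Spec_find_ambiguous_names; infer_instance

-- ===== CLAIM (what is proved, stated in full; the proofs are below) =====
def Claim_equal_find_ambiguous_names : Prop := ∀ (structures : List String), Dom_find_ambiguous_names structures → Spec_find_ambiguous_names structures (find_ambiguous_names structures)

-- ===== LEMMAS AND PROOFS =====

-- ---------- shared abbreviations (proof-side only) ----------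
-- the group of entries carrying normalized name k, and its indexed version
def pvGroup (structures : List String) (k : String) : List String :=
  structures.filter (fun t => pvKey t == k)

def pvIGrp (structures : List String) (k : String) : List (Int × String) :=
  (PySem.List.enumerate structures 0).filter (fun p => pvKey p.2 == k)

-- ---------- A side ----------
theorem modify_collapse_ins {κ ν : Type} [BEq κ] [LawfulBEq κ] (d : PySem.Dict κ ν) (k : κ) (v0 : ν) (f : ν → ν) :
    (if d.contains k then d else d.insert k v0).modify k v0 f = d.modify k v0 f := by
  by_cases h : d.contains k = true
  · simp [h]
  · simp only [Bool.not_eq_true] at h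
    simp only [h, Bool.false_eq_true, if_false]
    unfold PySem.Dict.modify
    rw [PySem.Dict.getD_insert_self, PySem.Dict.getD_of_not_contains _ _ h]
    apply PySem.Dict.ext
    rw [PySem.Dict.items_insert_of_contains _ _ (by simp [PySem.Dict.contains_insert_self]),
        PySem.Dict.items_insert_of_not_contains _ _ h,
        PySem.Dict.items_insert_of_not_contains _ _ h, List.map_append]
    congr 1
    · conv_rhs => rw [← List.map_id d.items]
      refine List.map_congr_left (fun p hp => ?_)
      have hne : (p.1 == k) = false := by
        by_contra hc
        simp only [Bool.not_eq_false] at hc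
        have : d.contains k = true := by
          unfold PySem.Dict.contains
          exact List.any_eq_true.mpr ⟨p, hp, hc⟩
        simp [this] at h
      simp [hne]
    · simp

def pvGrp (ps : List (String × String)) : PySem.Dict String (List String) :=
  ps.foldl (fun d p => d.modify p.1 [] (fun v => v ++ [p.2])) PySem.Dict.empty

theorem items_eq_keys_map {κ ν : Type} [BEq κ] [LawfulBEq κ] (d : PySem.Dict κ ν) (d0 : ν)
    (h : d.keys.Nodup) : d.items = d.keys.map (fun k => (k, d.getD k d0)) := by
  unfold PySem.Dict.keys
  rw [List.map_map]
  conv_lhs => rw [← List.map_id d.items]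
  refine List.map_congr_left (fun p hp => ?_)
  have : d.get? p.1 = some p.2 := PySem.Dict.get?_of_mem_items d (by simpa using hp) h
  simp [Function.comp, PySem.Dict.getD_of_get?_eq_some _ d0 this]

theorem pvGrp_keys (ps : List (String × String)) :
    (pvGrp ps).keys = PySem.Set.ofList (ps.map (fun p => p.1)) := by
  unfold pvGrp
  rw [PySem.Dict.keys_foldl_modify_key ps (fun p => p.1) [] (fun _ p => (fun v => v ++ [p.2]))]
  rfl

theorem pvGrp_nodup (ps : List (String × String)) : (pvGrp ps).keys.Nodup := by
  rw [pvGrp_keys]; exact PySem.Set.nodup_ofList _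

theorem pvGrp_getD (ps : List (String × String)) (k : String) :
    (pvGrp ps).getD k [] = (ps.filter (fun p => p.1 == k)).map (fun p => p.2) := by
  unfold pvGrp
  rw [PySem.Dict.getD_foldl_modify_append]
  simp

theorem pvGrp_items (ps : List (String × String)) :
    (pvGrp ps).items = (PySem.Set.ofList (ps.map (fun p => p.1))).map
      (fun k => (k, (ps.filter (fun p => p.1 == k)).map (fun p => p.2))) := by
  rw [items_eq_keys_map (pvGrp ps) [] (pvGrp_nodup ps), pvGrp_keys]
  exact List.map_congr_left (fun k _ => by rw [pvGrp_getD])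

theorem pairgroup_eq (structures : List String) (k : String) :
    ((structures.map (fun s => (pvKey s, s))).filter (fun p => p.1 == k)).map (fun p => p.2)
      = pvGroup structures k := by
  unfold pvGroup
  induction structures with
  | nil => rfl
  | cons x t ih =>
    by_cases h : (pvKey x == k) = true <;> simp [h, ih]

-- A's result in terms of the distinct-name list and per-name groups
theorem A_eq (structures : List String) :
    find_ambiguous_names structures =
      ((PySem.Set.ofList (structures.map pvKey)).map
        (fun k => (k, pvGroup structures k))).filter
        (fun kv => decide (kv.2.length > 1)) := by
  show (List.foldl (fun r kv => if kv.2.length > 1 then r.insert kv.1 kv.2 else r)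
      PySem.Dict.empty
      (structures.foldl (fun d s =>
        (if d.contains (pvKey s) then d else d.insert (pvKey s) []).modify
          (pvKey s) [] (fun v => v ++ [s])) PySem.Dict.empty).items).items = _
  have h1 : structures.foldl (fun d s =>
      (if d.contains (pvKey s) then d else d.insert (pvKey s) []).modify
        (pvKey s) [] (fun v => v ++ [s])) PySem.Dict.empty
      = pvGrp (structures.map (fun s => (pvKey s, s))) := by
    unfold pvGrp
    rw [List.foldl_map]
    exact PySem.List.foldl_congr_mem structures _ _ _
      (fun d s _ => modify_collapse_ins d (pvKey s) [] (fun v => v ++ [s]))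
  rw [h1]
  set ps := (pvGrp (structures.map (fun s => (pvKey s, s)))).items with hps
  have hnd : (ps.map (fun p => p.1)).Nodup := pvGrp_nodup _
  have hnd2 : ((ps.filter (fun kv => decide (kv.2.length > 1))).map (fun p => p.1)).Nodup :=
    (List.Sublist.map (fun (p : String × List String) => p.1)
      (List.filter_sublist (p := fun kv => decide (kv.2.length > 1)) (l := ps))).nodup hnd
  rw [PySem.List.foldl_ite_eq_foldl_filter
        (fun (kv : String × List String) => kv.2.length > 1)
        (fun r kv => r.insert kv.1 kv.2) ps PySem.Dict.empty]
  have := PySem.Dict.items_foldl_insert_fresh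
      (ps.filter (fun kv => decide (kv.2.length > 1))) (fun p => p.1) (fun p => p.2)
      PySem.Dict.empty (fun a _ => PySem.Dict.contains_empty _) hnd2
  simp only [this]
  rw [show (PySem.Dict.empty : PySem.Dict String (List String)).items = [] from rfl,
      List.nil_append]
  have hps2 : ps = (PySem.Set.ofList (structures.map pvKey)).map
      (fun k => (k, pvGroup structures k)) := by
    rw [hps, pvGrp_items]
    have hfst : (structures.map (fun s => (pvKey s, s))).map (fun p => p.1)
        = structures.map pvKey := by rw [List.map_map]; rfl
    rw [hfst]
    exact List.map_congr_left (fun k _ => by rw [pairgroup_eq])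
  rw [hps2]
  simp

-- ---------- B side ----------

-- insertBy structural equation (definitional in PySem)
theorem insertBy_cons {α : Type} (bf : α → α → Bool) (x y : α) (ys : List α) :
    PySem.List.insertBy bf x (y :: ys)
      = if bf x y then x :: y :: ys else y :: PySem.List.insertBy bf x ys := rfl

-- pass through a prefix no element of which goes after x
theorem insertBy_append_of_not_before {α : Type} (bf : α → α → Bool) (x : α)
    (A B : List α) (h : ∀ a ∈ A, bf x a = false) :
    PySem.List.insertBy bf x (A ++ B) = A ++ PySem.List.insertBy bf x B := by
  induction A with
  | nil => simp
  | cons a t ih =>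
    have ha : bf x a = false := h a (List.mem_cons_self)
    simp only [List.cons_append, insertBy_cons, ha, Bool.false_eq_true, if_false]
    rw [ih (fun b hb => h b (List.mem_cons_of_mem _ hb))]

-- insert at the head when the head (if any) goes after x
theorem insertBy_eq_cons {α : Type} (bf : α → α → Bool) (x : α) (B : List α)
    (h : B = [] ∨ ∃ b0 B', B = b0 :: B' ∧ bf x b0 = true) :
    PySem.List.insertBy bf x B = x :: B := by
  rcases h with h | ⟨b0, B', rfl, hb⟩
  · subst h; rfl
  · simp [insertBy_cons, hb]

theorem ofList_concat {α : Type} [BEq α] [LawfulBEq α] (L : List α) (k : α) :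
    PySem.Set.ofList (L ++ [k])
      = if k ∈ L then PySem.Set.ofList L else PySem.Set.ofList L ++ [k] := by
  rw [PySem.Set.ofList_eq_foldl, List.foldl_append, ← PySem.Set.ofList_eq_foldl]
  show PySem.Set.add _ _ = _
  unfold PySem.Set.add
  by_cases h : k ∈ L
  · simp [h]
  · simp [h]

theorem dropWhile_head_false {α : Type} (p : α → Bool) :
    ∀ (l : List α) (q : α) (t : List α), l.dropWhile p = q :: t → p q = false := by
  intro l
  induction l with
  | nil => intro q t h; simp at h
  | cons a l' ih =>
    intro q t h
    by_cases hp : p a = true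
    · rw [List.dropWhile_cons, if_pos hp] at h
      exact ih q t h
    · rw [List.dropWhile_cons, if_neg hp] at h
      injection h with h1 _
      subst h1
      simpa using hp

theorem sorted_concat {α : Type} (key : α → String) (xs : List α) (x : α) :
    PySem.List.sorted (xs ++ [x]) key false
      = PySem.List.insertBy (fun a b => decide (key a < key b)) x
          (PySem.List.sorted xs key false) := by
  rw [PySem.List.sorted_eq_foldl_insertBy, PySem.List.sorted_eq_foldl_insertBy,
      List.foldl_append]
  rfl

theorem flatMap_congr_mem {α β : Type} (l : List α) (f h : α → List β)
    (he : ∀ a ∈ l, f a = h a) : l.flatMap f = l.flatMap h := by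
  induction l with
  | nil => rfl
  | cons a t ih =>
    rw [List.flatMap_cons, List.flatMap_cons, he a List.mem_cons_self,
        ih (fun b hb => he b (List.mem_cons_of_mem _ hb))]

-- inserting x before a flatMap whose groups all carry keys above key x
theorem insertBy_flatMap_gt {α : Type} (key : α → String) (xs : List α) (x : α)
    (V : List String) (hgt : ∀ v ∈ V, key x < v)
    (hne : ∀ v ∈ V, xs.filter (fun a => key a == v) ≠ []) :
    PySem.List.insertBy (fun a b => decide (key a < key b)) x
        (V.flatMap (fun k => xs.filter (fun a => key a == k)))
      = x :: V.flatMap (fun k => xs.filter (fun a => key a == k)) := by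
  cases V with
  | nil => rfl
  | cons q V' =>
    rw [List.flatMap_cons]
    cases hgq : xs.filter (fun a => key a == q) with
    | nil => exact absurd hgq (hne q List.mem_cons_self)
    | cons c cs =>
      rw [List.cons_append]
      apply insertBy_eq_cons
      refine Or.inr ⟨c, _, rfl, ?_⟩
      have hc : key c = q := by
        have : c ∈ xs.filter (fun a => key a == q) := by rw [hgq]; exact List.mem_cons_self
        simpa using (List.mem_filter.mp this).2
      rw [hc]
      simp [hgt q List.mem_cons_self]

-- the stable sort of xs by key, named: groups in ascending key order, original order inside
theorem stable_sorted_flatMap {α : Type} (key : α → String) (xs : List α) :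
    PySem.List.sorted xs key false
      = (PySem.List.sorted (PySem.Set.ofList (xs.map key)) (fun k => k) false).flatMap
          (fun k => xs.filter (fun a => key a == k)) := by
  induction xs using List.reverseRecOn with
  | nil => rfl
  | append_singleton xs x ih =>
    have hmapx : (xs ++ [x]).map key = xs.map key ++ [key x] := by simp
    set k0 := key x with hk0
    set S := PySem.Set.ofList (xs.map key) with hS
    set D := PySem.List.sorted S (fun k => k) false with hD
    have hDpw : D.Pairwise (· < ·) := PySem.List.sorted_ofList_pairwise_lt _
    have hDperm : D.Perm S := PySem.List.sorted_perm _ _ _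
    have hmemD : ∀ u, u ∈ D ↔ u ∈ xs.map key := by
      intro u
      rw [hD, PySem.List.mem_sorted, hS, PySem.Set.mem_ofList]
    set g : String → List α := fun k => xs.filter (fun a => key a == k) with hg
    have hgg' : ∀ k, (xs ++ [x]).filter (fun a => key a == k)
        = g k ++ (if key x == k then [x] else []) := by
      intro k
      rw [List.filter_append]
      congr 1
      simp [List.filter_cons]
    have hgmem : ∀ k, ∀ a ∈ g k, key a = k := by
      intro k a ha
      simpa using (List.mem_filter.mp ha).2
    have hgne : ∀ k ∈ xs.map key, g k ≠ [] := by
      intro k hk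
      obtain ⟨a, ha, rfl⟩ := List.mem_map.mp hk
      exact List.ne_nil_of_mem (List.mem_filter.mpr ⟨ha, by simp⟩)
    set P := D.takeWhile (fun u => decide (u < k0)) with hP
    set Q := D.dropWhile (fun u => decide (u < k0)) with hQ
    have hPQ : P ++ Q = D := List.takeWhile_append_dropWhile
    have hPlt : ∀ u ∈ P, u < k0 := by
      intro u hu
      simpa using List.mem_takeWhile_imp hu
    have hQpw : Q.Pairwise (· < ·) := hDpw.sublist (List.dropWhile_sublist _)
    have hQge : ∀ u ∈ Q, k0 ≤ u := by
      intro u hu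
      cases hQc : Q with
      | nil => rw [hQc] at hu; simp at hu
      | cons q0 Qt =>
        have hq0 : ¬ (q0 < k0) := by
          have := dropWhile_head_false (fun u => decide (u < k0)) D q0 Qt (hQ.symm.trans hQc)
          simpa using this
        rw [hQc] at hu
        rcases List.mem_cons.mp hu with rfl | hu'
        · exact le_of_not_gt hq0
        · have : q0 < u := by
            rw [hQc] at hQpw
            exact (List.pairwise_cons.mp hQpw).1 u hu'
          exact (le_of_not_gt hq0).trans (le_of_lt this)
    -- the inserted element passes every group with key ≤ k0
    have hpass : ∀ (U : List String), (∀ u ∈ U, u ≤ k0) →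
        ∀ a ∈ U.flatMap g, (decide (key x < key a)) = false := by
      intro U hU a ha
      obtain ⟨u, hu, hau⟩ := List.mem_flatMap.mp ha
      rw [decide_eq_false_iff_not, hgmem u a hau, ← hk0]
      exact not_lt.mpr (hU u hu)
    rw [sorted_concat key xs x, ih, hmapx, ofList_concat, ← hS]
    by_cases hin : k0 ∈ xs.map key
    · rw [if_pos hin]
      -- k0 already occurs: D unchanged, x goes to the end of its group
      have hk0D : k0 ∈ D := (hmemD k0).mpr hin
      have hk0Q : k0 ∈ Q := by
        rcases List.mem_append.mp (by rw [hPQ]; exact hk0D) with h | h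
        · exact absurd (hPlt k0 h) (lt_irrefl k0)
        · exact h
      obtain ⟨Qt, hQc⟩ : ∃ Qt, Q = k0 :: Qt := by
        cases hQc : Q with
        | nil => rw [hQc] at hk0Q; simp at hk0Q
        | cons q0 Qt =>
          refine ⟨Qt, ?_⟩
          rw [hQc] at hk0Q
          rcases List.mem_cons.mp hk0Q with rfl | hmem
          · rfl
          · have hlt : q0 < k0 := by
              rw [hQc] at hQpw
              exact (List.pairwise_cons.mp hQpw).1 k0 hmem
            have hge : k0 ≤ q0 := hQge q0 (by rw [hQc]; exact List.mem_cons_self)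
            exact absurd hlt (not_lt.mpr hge)
      have hDeq : D = P ++ k0 :: Qt := by rw [← hPQ, hQc]
      have hQtgt : ∀ v ∈ Qt, k0 < v := by
        intro v hv
        rw [hQc] at hQpw
        exact (List.pairwise_cons.mp hQpw).1 v hv
      have hA : ∀ a ∈ P.flatMap g ++ g k0, decide (key x < key a) = false := by
        intro a ha
        rcases List.mem_append.mp ha with h | h
        · exact hpass P (fun u hu => le_of_lt (hPlt u hu)) a h
        · exact hpass [k0] (by simp) a (by simpa using h)
      have hQtne : ∀ v ∈ Qt, g v ≠ [] := by
        intro v hv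
        apply hgne
        apply (hmemD v).mp
        rw [hDeq]
        exact List.mem_append.mpr (Or.inr (List.mem_cons_of_mem _ hv))
      rw [← hD, hDeq, List.flatMap_append, List.flatMap_cons, ← List.append_assoc]
      rw [insertBy_append_of_not_before _ _ (P.flatMap g ++ g k0) _ hA]
      rw [insertBy_flatMap_gt key xs x Qt hQtgt hQtne]
      have hgP : ∀ u ∈ P, g u ++ (if key x == u then [x] else []) = g u := by
        intro u hu
        have : (key x == u) = false := by
          rw [← hk0]
          exact beq_eq_false_iff_ne.mpr (fun hc => absurd (hc ▸ hPlt u hu) (lt_irrefl u))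
        rw [this]
        simp
      have hgQt : ∀ u ∈ Qt, g u ++ (if key x == u then [x] else []) = g u := by
        intro u hu
        have : (key x == u) = false := by
          rw [← hk0]
          exact beq_eq_false_iff_ne.mpr (fun hc => absurd (hc ▸ hQtgt u hu) (lt_irrefl u))
        rw [this]
        simp
      rw [List.flatMap_append, List.flatMap_cons]
      rw [flatMap_congr_mem P (fun k => List.filter (fun a => key a == k) (xs ++ [x])) g
            (fun u hu => (hgg' u).trans (hgP u hu)),
          flatMap_congr_mem Qt (fun k => List.filter (fun a => key a == k) (xs ++ [x])) g
            (fun u hu => (hgg' u).trans (hgQt u hu)),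
          hgg' k0, ← hk0]
      simp [hg]
    · rw [if_neg hin]
      -- new name: it is spliced into the sorted key list between P and Q
      have hk0D : k0 ∉ D := fun hc => hin ((hmemD k0).mp hc)
      have hQgt : ∀ u ∈ Q, k0 < u := by
        intro u hu
        refine lt_of_le_of_ne (hQge u hu) (fun hc => hk0D ?_)
        rw [hc]
        rw [← hPQ]
        exact List.mem_append.mpr (Or.inr hu)
      have hD' : PySem.List.sorted (S ++ [k0]) (fun k => k) false = P ++ k0 :: Q := by
        apply PySem.List.sorted_eq_of_perm_of_pairwise_lt
        · have h1 : (P ++ k0 :: Q).Perm (k0 :: (P ++ Q)) := List.perm_middle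
          have h2 : (k0 :: (P ++ Q)).Perm (k0 :: S) := by rw [hPQ]; exact hDperm.cons k0
          have h3 : (k0 :: S).Perm (S ++ [k0]) := (List.perm_append_singleton k0 S).symm
          exact h1.trans (h2.trans h3)
        · apply List.pairwise_append.mpr
          refine ⟨hDpw.sublist (by rw [← hPQ]; exact List.sublist_append_left _ _), ?_, ?_⟩
          · exact List.pairwise_cons.mpr ⟨hQgt, hQpw⟩
          · intro p hp b hb
            rcases List.mem_cons.mp hb with rfl | hb'
            · exact hPlt p hp
            · exact (hPlt p hp).trans (hQgt b hb')
      have hQne2 : ∀ v ∈ Q, g v ≠ [] := by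
        intro v hv
        apply hgne
        apply (hmemD v).mp
        rw [← hPQ]
        exact List.mem_append.mpr (Or.inr hv)
      rw [hD', List.flatMap_append, List.flatMap_cons]
      rw [← hPQ, List.flatMap_append]
      rw [insertBy_append_of_not_before _ _ (P.flatMap g) _
        (hpass P (fun u hu => le_of_lt (hPlt u hu)))]
      rw [insertBy_flatMap_gt key xs x Q hQgt hQne2]
      have hgk0 : g k0 = [] := by
        apply List.filter_eq_nil_iff.mpr
        intro a ha hc
        apply hin
        have : key a = k0 := by simpa using hc
        rw [← this]
        exact List.mem_map.mpr ⟨a, ha, rfl⟩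
      have hgP : ∀ u ∈ P, g u ++ (if key x == u then [x] else []) = g u := by
        intro u hu
        have : (key x == u) = false := by
          rw [← hk0]
          exact beq_eq_false_iff_ne.mpr (fun hc => absurd (hc ▸ hPlt u hu) (lt_irrefl u))
        rw [this]
        simp
      have hgQ : ∀ u ∈ Q, g u ++ (if key x == u then [x] else []) = g u := by
        intro u hu
        have : (key x == u) = false := by
          rw [← hk0]
          exact beq_eq_false_iff_ne.mpr (fun hc => absurd (hc ▸ hQgt u hu) (lt_irrefl u))
        rw [this]
        simp
      rw [flatMap_congr_mem P (fun k => List.filter (fun a => key a == k) (xs ++ [x])) g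
            (fun u hu => (hgg' u).trans (hgP u hu)),
          flatMap_congr_mem Q (fun k => List.filter (fun a => key a == k) (xs ++ [x])) g
            (fun u hu => (hgg' u).trans (hgQ u hu)),
          hgg' k0, hgk0, ← hk0]
      simp [hg]

-- extending the open last run across a constant-key block
theorem fold_run (k : String) (b : List (Int × String)) :
    ∀ (R : List (List (Int × String))) (r : List (Int × String)),
    r ≠ [] → pvKey ((r.getLastD ((0:Int), "")).2) = k → (∀ p ∈ b, pvKey p.2 = k) →
    List.foldl pvStep (R ++ [r]) b = R ++ [r ++ b] := by
  induction b with
  | nil => intro R r _ _ _; simp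
  | cons p b' ih =>
    intro R r hr hlast hb
    have hstep : pvStep (R ++ [r]) p = R ++ [r ++ [p]] := by
      unfold pvStep
      rw [List.getLast?_concat]
      have : (pvKey ((r.getLastD ((0:Int), "")).2) == pvKey p.2) = true := by
        rw [hlast, hb p List.mem_cons_self]; simp
      simp only [this, if_true, List.dropLast_concat]
    rw [List.foldl_cons, hstep,
        ih R (r ++ [p]) (by simp) (by rw [List.getLastD_concat]; exact hb p List.mem_cons_self)
          (fun q hq => hb q (List.mem_cons_of_mem _ hq))]
    simp

-- the run-cutting fold over a flatMap of nonempty constant-key groups with distinct keys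
theorem fold_blocks (g : String → List (Int × String)) :
    ∀ (D : List String) (acc : List (List (Int × String))),
    (∀ k ∈ D, g k ≠ []) → (∀ k ∈ D, ∀ p ∈ g k, pvKey p.2 = k) → D.Nodup →
    (acc = [] ∨ ∃ R r, acc = R ++ [r] ∧ r ≠ [] ∧ pvKey ((r.getLastD ((0:Int), "")).2) ∉ D) →
    List.foldl pvStep acc (D.flatMap g) = acc ++ D.map g := by
  intro D
  induction D with
  | nil => intro acc _ _ _ _; simp
  | cons k D' ih =>
    intro acc hne hkey hnd hacc
    obtain ⟨p0, b, hgk⟩ : ∃ p0 b, g k = p0 :: b := by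
      cases hg : g k with
      | nil => exact absurd hg (hne k List.mem_cons_self)
      | cons p0 b => exact ⟨p0, b, rfl⟩
    have hp0 : pvKey p0.2 = k := hkey k List.mem_cons_self p0 (by rw [hgk]; exact List.mem_cons_self)
    have hstep : pvStep acc p0 = acc ++ [[p0]] := by
      rcases hacc with rfl | ⟨R, r, rfl, hr, hlk⟩
      · rfl
      · unfold pvStep
        rw [List.getLast?_concat]
        have : (pvKey ((r.getLastD ((0:Int), "")).2) == pvKey p0.2) = false := by
          rw [hp0]
          exact beq_eq_false_iff_ne.mpr (fun hc => hlk (hc ▸ List.mem_cons_self))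
        simp only [this, Bool.false_eq_true, if_false]
    have hblock : List.foldl pvStep acc (g k) = acc ++ [g k] := by
      rw [hgk, List.foldl_cons, hstep,
          fold_run k b acc [p0] (by simp) (by simpa using hp0)
            (fun q hq => hkey k List.mem_cons_self q (by rw [hgk]; exact List.mem_cons_of_mem _ hq))]
      simp
    have hglast : pvKey (((g k).getLastD ((0:Int), "")).2) = k := by
      have hmem : (g k).getLastD ((0:Int), "") ∈ g k := by
        rw [hgk]
        rw [List.getLastD_eq_getLast?, List.getLast?_eq_some_getLast (l := p0 :: b) (by simp)]
        exact List.getLast_mem _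
      exact hkey k List.mem_cons_self _ hmem
    rw [List.flatMap_cons, List.foldl_append, hblock,
        ih (acc ++ [g k]) (fun u hu => hne u (List.mem_cons_of_mem _ hu))
          (fun u hu => hkey u (List.mem_cons_of_mem _ hu)) hnd.of_cons
          (Or.inr ⟨acc, g k, rfl, by rw [hgk]; simp, by
            rw [hglast]; exact (List.nodup_cons.mp hnd).1⟩)]
    simp

theorem runs_fold_flatMap (D : List String) (g : String → List (Int × String))
    (hne : ∀ k ∈ D, g k ≠ [])
    (hkey : ∀ k ∈ D, ∀ p ∈ g k, pvKey p.2 = k)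
    (hnd : D.Nodup) :
    (D.flatMap g).foldl pvStep [] = D.map g := by
  rw [fold_blocks g D [] hne hkey hnd (Or.inl rfl)]
  simp

-- basic facts about pvIGrp
theorem pvIGrp_ne_nil (structures : List String) (k : String)
    (h : k ∈ PySem.Set.ofList (structures.map pvKey)) : pvIGrp structures k ≠ [] := by
  have hk : k ∈ structures.map pvKey := (PySem.Set.mem_ofList _ _).mp h
  obtain ⟨s, hs, hks⟩ := List.mem_map.mp hk
  have hs2 : s ∈ (PySem.List.enumerate structures 0).map (fun p => p.2) := by
    rw [PySem.List.map_snd_enumerate]; exact hs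
  obtain ⟨p, hp, hps⟩ := List.mem_map.mp hs2
  have : p ∈ pvIGrp structures k :=
    List.mem_filter.mpr ⟨hp, by simp [hps, hks]⟩
  exact List.ne_nil_of_mem this

theorem pvIGrp_key (structures : List String) (k : String) :
    ∀ p ∈ pvIGrp structures k, pvKey p.2 = k := by
  intro p hp
  have := (List.mem_filter.mp hp).2
  simpa using this

theorem pvIGrp_map_snd (structures : List String) (k : String) :
    (pvIGrp structures k).map (fun p => p.2) = pvGroup structures k := by
  unfold pvIGrp pvGroup
  have h := List.filter_map (f := fun p : Int × String => p.2)
      (l := PySem.List.enumerate structures 0) (p := fun t => pvKey t == k)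
  rw [PySem.List.map_snd_enumerate] at h
  rw [h]
  rfl

theorem headD_append_left {α : Type} (a b : List α) (d : α) (h : a ≠ []) :
    (a ++ b).headD d = a.headD d := by
  cases a with
  | nil => exact absurd rfl h
  | cons x t => rfl

theorem headD_mem {α : Type} (a : List α) (d : α) (h : a ≠ []) : a.headD d ∈ a := by
  cases a with
  | nil => exact absurd rfl h
  | cons x t => exact List.mem_cons_self

theorem pvIGrp_append (l : List String) (x : String) (k : String) :
    pvIGrp (l ++ [x]) k
      = pvIGrp l k ++ (if pvKey x == k then [((l.length : Int), x)] else []) := by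
  unfold pvIGrp
  rw [PySem.List.enumerate_append, List.filter_append]
  congr 1
  simp [PySem.List.enumerate_cons, PySem.List.enumerate_nil, List.filter_cons]

theorem idx_lt (l : List String) (p : Int × String) (h : p ∈ PySem.List.enumerate l 0) :
    p.1 < (l.length : Int) := by
  obtain ⟨j, hj, rfl⟩ := (PySem.List.mem_enumerate_iff _ _ _).mp h
  simpa using hj

theorem pvIGrp_head_append (l : List String) (x : String) (k : String)
    (h : k ∈ PySem.Set.ofList (l.map pvKey)) :
    ((pvIGrp (l ++ [x]) k).headD ((0:Int), "")).1
      = ((pvIGrp l k).headD ((0:Int), "")).1 := by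
  rw [pvIGrp_append, headD_append_left _ _ _ (pvIGrp_ne_nil l k h)]

-- first-occurrence heads are strictly increasing along the first-occurrence key order
theorem heads_pairwise (structures : List String) :
    (PySem.Set.ofList (structures.map pvKey)).Pairwise
      (fun k1 k2 => ((pvIGrp structures k1).headD ((0:Int), "")).1
                  < ((pvIGrp structures k2).headD ((0:Int), "")).1) := by
  induction structures using List.reverseRecOn with
  | nil => exact List.Pairwise.nil
  | append_singleton l x ih =>
    have hmap : (l ++ [x]).map pvKey = l.map pvKey ++ [pvKey x] := by simp
    rw [hmap, ofList_concat]
    by_cases hx : pvKey x ∈ l.map pvKey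
    · rw [if_pos hx]
      refine ih.imp_of_mem ?_
      intro k1 k2 h1 h2 hlt
      rw [pvIGrp_head_append l x k1 h1, pvIGrp_head_append l x k2 h2]
      exact hlt
    · rw [if_neg hx]
      apply List.pairwise_append.mpr
      refine ⟨ih.imp_of_mem (fun {k1 k2} h1 h2 hlt => by
          rw [pvIGrp_head_append l x k1 h1, pvIGrp_head_append l x k2 h2]; exact hlt),
        List.pairwise_singleton _ _, ?_⟩
      intro k1 h1 k2 h2
      rw [List.mem_singleton] at h2
      subst h2
      have hnewgrp : pvIGrp (l ++ [x]) (pvKey x) = [((l.length : Int), x)] := by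
        rw [pvIGrp_append]
        have hempty : pvIGrp l (pvKey x) = [] := by
          apply List.filter_eq_nil_iff.mpr
          intro p hp hc
          apply hx
          have : pvKey p.2 = pvKey x := by simpa using hc
          rw [← this]
          exact List.mem_map.mpr ⟨p.2, by
            rw [← PySem.List.map_snd_enumerate (xs := l) (s := 0)]
            exact ⟨List.mem_map.mpr ⟨p, hp, rfl⟩, rfl⟩⟩
        rw [hempty]
        simp
      rw [pvIGrp_head_append l x k1 h1, hnewgrp]
      show ((pvIGrp l k1).headD ((0:Int), "")).1 < (l.length : Int)
      have hne := pvIGrp_ne_nil l k1 h1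
      have hmem : (pvIGrp l k1).headD ((0:Int), "") ∈ pvIGrp l k1 := headD_mem _ _ hne
      exact idx_lt l _ (List.mem_of_mem_filter hmem)

-- B's result in the same terms
theorem B_eq (structures : List String) :
    find_ambiguous_names_alt structures =
      ((PySem.Set.ofList (structures.map pvKey)).filter
        (fun k => decide ((pvGroup structures k).length > 1))).map
        (fun k => (k, pvGroup structures k)) := by
  simp only [find_ambiguous_names_alt]
  set E := PySem.Set.ofList (structures.map pvKey) with hE
  have hmap : (PySem.List.enumerate structures 0).map (fun p => pvKey p.2)
      = structures.map pvKey := by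
    conv_rhs => rw [← PySem.List.map_snd_enumerate (xs := structures) (s := 0)]
    rw [List.map_map]
    rfl
  have horder : PySem.List.sorted (PySem.List.enumerate structures 0)
        (fun p => pvKey p.2) false
      = (PySem.List.sorted E (fun k => k) false).flatMap (pvIGrp structures) := by
    rw [stable_sorted_flatMap (fun p => pvKey p.2) (PySem.List.enumerate structures 0), hmap,
        ← hE]
    rfl
  set D := PySem.List.sorted E (fun k => k) false with hD
  have hDperm : D.Perm E := PySem.List.sorted_perm _ _ _
  have hmemD : ∀ u, u ∈ D ↔ u ∈ E := fun u => PySem.List.mem_sorted _ _ _ _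
  have hDnd : D.Nodup := hDperm.nodup_iff.mpr (PySem.Set.nodup_ofList _)
  have hruns : (D.flatMap (pvIGrp structures)).foldl pvStep [] = D.map (pvIGrp structures) :=
    runs_fold_flatMap D _ (fun k hk => pvIGrp_ne_nil structures k ((hmemD k).mp hk))
      (fun k hk => pvIGrp_key structures k) hDnd
  rw [horder, hruns, List.filter_map]
  set q : String → Bool :=
    (fun (r : List (Int × String)) => decide (r.length > 1)) ∘ pvIGrp structures with hq
  have hperm : ((E.filter q).map (pvIGrp structures)).Perm
      ((D.filter q).map (pvIGrp structures)) :=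
    ((hDperm.filter q).symm).map _
  have hpw : ((E.filter q).map (pvIGrp structures)).Pairwise
      (fun r1 r2 => (r1.headD ((0:Int), "")).1 < (r2.headD ((0:Int), "")).1) := by
    apply List.pairwise_map.mpr
    exact (heads_pairwise structures).sublist List.filter_sublist
  have hsorted3 : PySem.List.sorted ((D.filter q).map (pvIGrp structures))
        (fun r => (r.headD ((0:Int), "")).1) false
      = (E.filter q).map (pvIGrp structures) :=
    PySem.List.sorted_eq_of_perm_of_pairwise_lt _ _ _ hperm hpw
  rw [hsorted3]
  have hkeyf : ∀ k ∈ E.filter q, pvKey (((pvIGrp structures k).headD ((0:Int), "")).2) = k := by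
    intro k hk
    have hkE : k ∈ E := List.mem_of_mem_filter hk
    exact pvIGrp_key structures k _ (headD_mem _ _ (pvIGrp_ne_nil structures k hkE))
  have hmapkeys : ((E.filter q).map (pvIGrp structures)).map
        (fun r => pvKey ((r.headD ((0:Int), "")).2)) = E.filter q := by
    rw [List.map_map]
    exact (List.map_congr_left (fun k hk => hkeyf k hk)).trans (List.map_id _)
  have hnd2 : (((E.filter q).map (pvIGrp structures)).map
      (fun r => pvKey ((r.headD ((0:Int), "")).2))).Nodup := by
    rw [hmapkeys]
    exact List.filter_sublist.nodup (PySem.Set.nodup_ofList _)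
  have hitems := PySem.Dict.items_foldl_insert_fresh ((E.filter q).map (pvIGrp structures))
      (fun r => pvKey ((r.headD ((0:Int), "")).2)) (fun r => r.map (fun p => p.2))
      PySem.Dict.empty (fun a _ => PySem.Dict.contains_empty _) hnd2
  simp only [hitems]
  rw [show (PySem.Dict.empty : PySem.Dict String (List String)).items = [] from rfl,
      List.nil_append, List.map_map]
  have hagree : ∀ k ∈ E.filter q,
      ((fun r => (pvKey ((r.headD ((0:Int), "")).2), r.map (fun p => p.2)))
        ∘ pvIGrp structures) k = (k, pvGroup structures k) := by
    intro k hk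
    show (pvKey (((pvIGrp structures k).headD ((0:Int), "")).2),
          (pvIGrp structures k).map (fun p => p.2)) = (k, pvGroup structures k)
    rw [hkeyf k hk, pvIGrp_map_snd]
  rw [List.map_congr_left hagree]
  congr 1
  apply List.filter_congr
  intro k _
  rw [hq]
  show decide ((pvIGrp structures k).length > 1) = decide ((pvGroup structures k).length > 1)
  have : (pvIGrp structures k).length = (pvGroup structures k).length := by
    rw [← pvIGrp_map_snd structures k, List.length_map]
  rw [this]

theorem find_ambiguous_names_eq_alt (structures : List String) :
    find_ambiguous_names structures = find_ambiguous_names_alt structures := by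
  rw [A_eq, B_eq, List.filter_map]
  rfl

-- ===== VERDICT (by name: the statement is the Claim_ definition above) =====
theorem find_ambiguous_names_spec : Claim_equal_find_ambiguous_names := by
  intro structures _
  unfold Spec_find_ambiguous_names
  exact find_ambiguous_names_eq_alt structures
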